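-- pv_equiv track=rewrite | github.com/unsat/ceti2 | src/faultloc.py | analyzeCovs
-- ===== SOURCE A (Python) =====
-- from collections import Counter
--
-- def analyzeCovs(sids):
--     assert all(isinstance(sid, int) for sid in sids) and sids, sids
--     freqs = Counter()
--     nruns = 0
--
--     import itertools
--     for k, g in itertools.groupby(sids, key=lambda x: x != 0):
--         if not k: continue
--         nruns += 1
--         for sid in g:
--             freqs[sid] += 1
--
--     return nruns, freqs
-- ===== SOURCE B (Python) =====
-- from collections import Counter
--
-- def analyzeCovs(sids):
--     assert all(isinstance(sid, int) for sid in sids) and sids, sids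
--     freqs = Counter(s for s in sids if s != 0)
--     nruns = sum(1 for prev, cur in zip([0] + list(sids), sids) if prev == 0 and cur != 0)
--     return nruns, freqs
-- ===== Notes on version B (the rewrite author's own statement) =====
-- stated objective: simpler
-- what changed: Replaces itertools.groupby with its nested per-group loop by two stateless staged passes: a Counter built from a filtering comprehension, plus a run count obtained by zipping the list with its predecessor (virtual leading 0) and counting zero-to-nonzero boundaries.
import Mathlib
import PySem

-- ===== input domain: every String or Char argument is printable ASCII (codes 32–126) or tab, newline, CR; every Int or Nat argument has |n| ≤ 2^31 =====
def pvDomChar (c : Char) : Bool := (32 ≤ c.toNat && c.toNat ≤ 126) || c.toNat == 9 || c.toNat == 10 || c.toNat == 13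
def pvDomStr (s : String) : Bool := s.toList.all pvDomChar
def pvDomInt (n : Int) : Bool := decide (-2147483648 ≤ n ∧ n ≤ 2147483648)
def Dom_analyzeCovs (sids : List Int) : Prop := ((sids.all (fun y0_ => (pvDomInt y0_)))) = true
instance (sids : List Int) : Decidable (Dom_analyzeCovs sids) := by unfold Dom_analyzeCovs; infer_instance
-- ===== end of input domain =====

-- B replaces groupby's nested per-group loop by two stateless staged passes: a Counter of the
-- filtered nonzeros, and a run count from zipping the list with its predecessor; objective: simpler.

-- ===== PORT A =====
-- key of itertools.groupby: x != 0
def pvKey (x : Int) : Bool := x != 0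

-- itertools.groupby(sids, key=x != 0): maximal runs of equal key, in order
def pvGroup : List Int → List (Bool × List Int)
  | [] => []
  | x :: xs =>
    (pvKey x, x :: xs.takeWhile (fun y => pvKey y == pvKey x)) ::
      pvGroup (xs.dropWhile (fun y => pvKey y == pvKey x))
termination_by l => l.length
decreasing_by simpa using Nat.lt_succ_of_le (List.length_dropWhile_le _ xs)

def analyzeCovs (sids : List Int) : Int × (List (Int × Int)) :=
  -- for k, g in groupby(...): if not k: continue; nruns += 1; for sid in g: freqs[sid] += 1
  let res := (pvGroup sids).foldl
    (fun acc kg =>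
      if kg.1 then (acc.1 + 1, kg.2.foldl (fun d s => d.modify s 0 (· + 1)) acc.2)
      else acc)
    ((0 : Int), (PySem.Dict.empty : PySem.Dict Int Int))
  (res.1, res.2.items)

-- ===== PORT B =====
def analyzeCovs_alt (sids : List Int) : Int × (List (Int × Int)) :=
  -- freqs = Counter(s for s in sids if s != 0)
  let freqs := (sids.filter (fun s => s ≠ 0)).foldl
    (fun d s => d.modify s 0 (· + 1)) (PySem.Dict.empty : PySem.Dict Int Int)
  -- nruns = sum(1 for prev, cur in zip([0] + list(sids), sids) if prev == 0 and cur != 0)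
  let nruns := (((0 : Int) :: sids).zip sids).foldl
    (fun n pc => if pc.1 = 0 ∧ pc.2 ≠ 0 then n + 1 else n) (0 : Int)
  (nruns, freqs.items)

-- ===== PRECONDITION & SPEC =====
-- A's (and B's) assert rejects the empty list with AssertionError, so Pre_ excludes it.
def Pre_analyzeCovs (sids : List Int) : Prop := sids ≠ []
instance (sids : List Int) : Decidable (Pre_analyzeCovs sids) := by unfold Pre_analyzeCovs; infer_instance
def pvWitness_analyzeCovs : List Int := [1, 0, 2]

def Spec_analyzeCovs (sids : List Int) (out : Int × (List (Int × Int))) : Prop := out = analyzeCovs_alt sids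
instance (sids : List Int) (out : Int × (List (Int × Int))) : Decidable (Spec_analyzeCovs sids out) := by unfold Spec_analyzeCovs; infer_instance

-- ===== CLAIM (what is proved, stated in full; the proofs are below) =====
def Claim_equal_analyzeCovs : Prop := ∀ (sids : List Int), Dom_analyzeCovs sids → Pre_analyzeCovs sids → Spec_analyzeCovs sids (analyzeCovs sids)

-- ===== LEMMAS AND PROOFS =====

-- proof-side names for A's fold body, the frequency step, and the transition count
def pvStepA (acc : Int × PySem.Dict Int Int) (kg : Bool × List Int) : Int × PySem.Dict Int Int :=
  if kg.1 then (acc.1 + 1, kg.2.foldl (fun d s => d.modify s 0 (· + 1)) acc.2)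
  else acc

def pvFmod (d : PySem.Dict Int Int) (s : Int) : PySem.Dict Int Int := d.modify s 0 (· + 1)

def pvCnt : Int → List Int → Int
  | _, [] => 0
  | p, x :: xs => (if p = 0 ∧ x ≠ 0 then 1 else 0) + pvCnt x xs

-- B's zip fold computes pvCnt
theorem pvZipFold (l : List Int) : ∀ (p n : Int),
    ((p :: l).zip l).foldl (fun n pc => if pc.1 = 0 ∧ pc.2 ≠ 0 then n + 1 else n) n
      = n + pvCnt p l := by
  induction l with
  | nil => intro p n; simp [pvCnt]
  | cons x xs ih =>
    intro p n
    simp only [List.zip_cons_cons, List.foldl_cons, pvCnt, ih x]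
    split_ifs <;> omega

-- pvCnt is insensitive to the previous element when the rest starts with 0 (or is empty)
theorem pvCnt_indep (rest : List Int) (p q : Int)
    (h : ∀ y t, rest = y :: t → y = 0) : pvCnt p rest = pvCnt q rest := by
  cases rest with
  | nil => rfl
  | cons y t =>
    have hy : y = 0 := h y t rfl
    simp [pvCnt, hy]

theorem pvCnt_zeros (g : List Int) (rest : List Int)
    (hg : ∀ y ∈ g, y = 0) : pvCnt 0 (g ++ rest) = pvCnt 0 rest := by
  induction g with
  | nil => rfl
  | cons y t ih =>
    have hy : y = 0 := hg y (by simp)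
    have ht := ih (fun z hz => hg z (by simp [hz]))
    calc pvCnt 0 ((y :: t) ++ rest) = pvCnt y (t ++ rest) := by simp [pvCnt, hy]
      _ = pvCnt 0 rest := by rw [hy, ht]

theorem pvCnt_nonzeros (g : List Int) (rest : List Int) : ∀ (p : Int), p ≠ 0 →
    (∀ y ∈ g, y ≠ 0) → (∀ y t, rest = y :: t → y = 0) →
    pvCnt p (g ++ rest) = pvCnt 0 rest := by
  induction g with
  | nil => intro p hp _ hrest; exact pvCnt_indep rest p 0 hrest
  | cons y t ih =>
    intro p hp hg hrest
    have hy : y ≠ 0 := hg y (by simp)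
    have := ih y hy (fun z hz => hg z (by simp [hz])) hrest
    simpa [pvCnt, hp] using this

-- head of dropWhile falsifies the predicate
theorem pvDropWhile_head_false (p : Int → Bool) (xs : List Int) (h : Int) (t : List Int)
    (hd : xs.dropWhile p = h :: t) : p h = false := by
  induction xs with
  | nil => simp at hd
  | cons x xs ih =>
    by_cases hx : p x
    · exact ih (by simpa [List.dropWhile_cons, hx] using hd)
    · simp [hx] at hd
      simpa [hd.1] using hx

-- main invariant: A's fold over the groups equals (prefix runs added, frequencies of the nonzeros)
theorem pvMain (sids : List Int) : ∀ (n : Int) (d : PySem.Dict Int Int),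
    (pvGroup sids).foldl pvStepA (n, d)
      = (n + pvCnt 0 sids, (sids.filter (fun s => s ≠ 0)).foldl pvFmod d) := by
  intro n d
  match sids with
  | [] => simp [pvGroup, pvCnt]
  | x :: xs =>
    have hsplit : xs.takeWhile (fun y => pvKey y == pvKey x)
        ++ xs.dropWhile (fun y => pvKey y == pvKey x) = xs :=
      List.takeWhile_append_dropWhile
    have hgrp : pvGroup (x :: xs)
        = (pvKey x, x :: xs.takeWhile (fun y => pvKey y == pvKey x)) ::
            pvGroup (xs.dropWhile (fun y => pvKey y == pvKey x)) := by
      simp [pvGroup]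
    by_cases hx : x = 0
    · -- zero group: A skips it; all its elements are 0, so it adds no run and no frequency
      have hk : pvKey x = false := by simp [pvKey, hx]
      have hz : ∀ y ∈ xs.takeWhile (fun y => pvKey y == pvKey x), y = 0 := by
        intro y hy
        have := List.mem_takeWhile_imp hy
        simpa [pvKey, hx] using this
      have hnul : (x :: xs.takeWhile (fun y => pvKey y == pvKey x)).filter
          (fun s => s ≠ 0) = [] :=
        List.filter_eq_nil_iff.mpr (by
          intro a ha
          rcases List.mem_cons.mp ha with h | h
          · simp [h, hx]
          · simp [hz a h])
      have hfil : (x :: xs).filter (fun s => s ≠ 0)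
          = (xs.dropWhile (fun y => pvKey y == pvKey x)).filter (fun s => s ≠ 0) := by
        rw [show x :: xs = (x :: xs.takeWhile (fun y => pvKey y == pvKey x))
              ++ xs.dropWhile (fun y => pvKey y == pvKey x) from by simp [hsplit],
          List.filter_append, hnul]
        simp
      have hcnt : pvCnt 0 (x :: xs) = pvCnt 0 (xs.dropWhile (fun y => pvKey y == pvKey x)) := by
        rw [show x :: xs = (x :: xs.takeWhile (fun y => pvKey y == pvKey x))
              ++ xs.dropWhile (fun y => pvKey y == pvKey x) from by simp [hsplit]]
        exact pvCnt_zeros _ _ (by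
          intro y hy
          rcases List.mem_cons.mp hy with h | h
          · exact h.trans hx
          · exact hz y h)
      rw [hgrp, List.foldl_cons,
        show pvStepA (n, d) (pvKey x, x :: xs.takeWhile (fun y => pvKey y == pvKey x)) = (n, d)
          from by simp [pvStepA, hk],
        pvMain (xs.dropWhile (fun y => pvKey y == pvKey x)) n d, hfil, hcnt]
    · -- nonzero group: A counts one run and folds its elements into the dict
      have hk : pvKey x = true := by simp [pvKey, hx]
      have hxt : (x != 0) = true := by simp [hx]
      have hnz : ∀ y ∈ xs.takeWhile (fun y => pvKey y == pvKey x), y ≠ 0 := by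
        intro y hy
        have := List.mem_takeWhile_imp hy
        simp only [pvKey, hxt] at this
        simpa using this
      have hrest0 : ∀ y t, xs.dropWhile (fun y => pvKey y == pvKey x) = y :: t → y = 0 := by
        intro y t hyt
        have := pvDropWhile_head_false _ xs y t hyt
        simp only [pvKey, hxt] at this
        simpa using this
      have hfil : (x :: xs).filter (fun s => s ≠ 0)
          = (x :: xs.takeWhile (fun y => pvKey y == pvKey x))
              ++ (xs.dropWhile (fun y => pvKey y == pvKey x)).filter (fun s => s ≠ 0) := by
        rw [show x :: xs = (x :: xs.takeWhile (fun y => pvKey y == pvKey x))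
              ++ xs.dropWhile (fun y => pvKey y == pvKey x) from by simp [hsplit],
          List.filter_append]
        congr 1
        rw [List.filter_eq_self]
        intro a ha
        rcases List.mem_cons.mp ha with h | h
        · simp [h, hx]
        · simp [hnz a h]
      have hcnt : pvCnt 0 (x :: xs)
          = 1 + pvCnt 0 (xs.dropWhile (fun y => pvKey y == pvKey x)) := by
        rw [show x :: xs = x :: (xs.takeWhile (fun y => pvKey y == pvKey x)
              ++ xs.dropWhile (fun y => pvKey y == pvKey x)) from by rw [hsplit],
          show pvCnt 0 (x :: (xs.takeWhile (fun y => pvKey y == pvKey x)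
              ++ xs.dropWhile (fun y => pvKey y == pvKey x)))
            = 1 + pvCnt x (xs.takeWhile (fun y => pvKey y == pvKey x)
              ++ xs.dropWhile (fun y => pvKey y == pvKey x)) from by simp [pvCnt, hx],
          pvCnt_nonzeros _ _ x hx hnz hrest0]
      rw [hgrp, List.foldl_cons,
        show pvStepA (n, d) (pvKey x, x :: xs.takeWhile (fun y => pvKey y == pvKey x))
            = (n + 1, (x :: xs.takeWhile (fun y => pvKey y == pvKey x)).foldl pvFmod d)
          from by rw [hk]; rfl,
        pvMain (xs.dropWhile (fun y => pvKey y == pvKey x)) (n + 1)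
          ((x :: xs.takeWhile (fun y => pvKey y == pvKey x)).foldl pvFmod d),
        hfil, List.foldl_append, hcnt, add_assoc]
termination_by sids.length
decreasing_by all_goals simpa using Nat.lt_succ_of_le (List.length_dropWhile_le _ xs)

-- ===== VERDICT (by name: the statement is the Claim_ definition above) =====
theorem analyzeCovs_spec : Claim_equal_analyzeCovs := by
  intro sids _ _
  show analyzeCovs sids = analyzeCovs_alt sids
  simp only [analyzeCovs, analyzeCovs_alt]
  rw [show (fun (acc : Int × PySem.Dict Int Int) (kg : Bool × List Int) =>
      if kg.1 then (acc.1 + 1, kg.2.foldl (fun d s => d.modify s 0 (· + 1)) acc.2)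
      else acc) = pvStepA from rfl,
    show (fun (d : PySem.Dict Int Int) (s : Int) => d.modify s 0 (· + 1)) = pvFmod from rfl,
    pvMain sids 0 PySem.Dict.empty, pvZipFold sids 0 0]
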